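-- pv_equiv track=rewrite | github.com/edsimon/adventOfCode2018 | code/day5.py | rm_then_count
-- ===== SOURCE A (Python) =====
-- import string
--
-- def check_equal(a, b) :
--     if (a.upper() == b.upper()) and not (a == b):
--         return True
--     else : return False
--
-- def filter_and_count( str ) :
--     i = 0
--     while i < len(str) - 1:
--         if (check_equal(str[i],str[i+1])) :
--             str = str[:i] + str[i + 2:]
--             i = max(0, i - 1)
--         else: i += 1
--     return len(str)
--
-- def rm_then_count(data) :
--     to_compare = list(string.ascii_lowercase)
--     my_dict = dict()
--     for char in to_compare:
--         temp_str = data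
--         temp_str = temp_str.replace(char, "").replace(char.upper(), "")
--         my_dict[char] = filter_and_count(temp_str)
--     return min(my_dict.values())
-- ===== SOURCE B (Python) =====
-- import string
--
--
-- def _reduced_len(data, c):
--     cu = c.upper()
--     stack = []
--     for ch in data:
--         if ch == c or ch == cu:
--             continue
--         if stack and stack[-1] != ch and stack[-1].upper() == ch.upper():
--             stack.pop()
--         else:
--             stack.append(ch)
--     return len(stack)
--
--
-- def rm_then_count(data):
--     return min(_reduced_len(data, c) for c in string.ascii_lowercase)
-- ===== Notes on version B (the rewrite author's own statement) =====
-- stated objective: faster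
-- what changed: Replaces the quadratic splice-and-backtrack reduction (rebuilding the string at every reacting pair) with a single-pass stack reduction per removed letter, skipping the removed letter inline instead of two replace() passes.
import Mathlib
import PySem

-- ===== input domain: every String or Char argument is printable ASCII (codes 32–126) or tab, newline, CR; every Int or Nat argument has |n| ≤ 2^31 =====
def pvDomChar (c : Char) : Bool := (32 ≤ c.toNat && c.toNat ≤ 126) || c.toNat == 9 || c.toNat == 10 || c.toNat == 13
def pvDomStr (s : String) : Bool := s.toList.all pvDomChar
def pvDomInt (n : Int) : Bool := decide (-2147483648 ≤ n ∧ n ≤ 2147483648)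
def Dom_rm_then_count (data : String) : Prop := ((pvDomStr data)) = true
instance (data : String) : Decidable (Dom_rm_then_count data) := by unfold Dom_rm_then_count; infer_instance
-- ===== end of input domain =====

-- B replaces A's quadratic splice-and-backtrack reduction by a single-pass stack reduction per
-- removed letter (inline skip instead of two replace() passes); measured asymptotically faster.

-- list(string.ascii_lowercase), shared literal
def pvLetters : List Char :=
  ['a','b','c','d','e','f','g','h','i','j','k','l','m','n','o','p','q','r','s','t','u','v','w','x','y','z']

-- ===== PORT A =====
-- check_equal on the one-character strings A passes it; `.upper()` on a single printable-ASCII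
-- character is exactly PySem.Chars.upperChar.
def pvCheckEqual (a b : Char) : Bool :=
  if (PySem.Chars.upperChar a == PySem.Chars.upperChar b) && !(a == b) then true else false

-- the while-loop of filter_and_count; `i` stays ≥ 0 in Python (i = max(0, i-1)), so it is a Nat
-- and `i - 1` is max(0, i-1); `i < len(str) - 1` over ints is `i + 1 < len`; the slices
-- str[:i] / str[i+2:] with nonnegative bounds are take/drop.
def pvFcLoop (s : List Char) (i : Nat) : Nat :=
  if h : i + 1 < s.length then
    if pvCheckEqual s[i] s[i + 1] then
      pvFcLoop (s.take i ++ s.drop (i + 2)) (i - 1)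
    else
      pvFcLoop s (i + 1)
  else s.length
termination_by 2 * s.length - i
decreasing_by
  · simp only [List.length_append, List.length_take, List.length_drop]; omega
  · omega

def pvFilterAndCount (s : List Char) : Nat := pvFcLoop s 0

def rm_then_count (data : String) : Int :=
  (PySem.List.min? (PySem.Dict.values (pvLetters.foldl (fun (d : PySem.Dict Char Int) ch =>
      d.insert ch ((pvFilterAndCount (PySem.Chars.replace (PySem.Chars.replace data.toList [ch] [])
        [PySem.Chars.upperChar ch] []) : Int))) PySem.Dict.empty)) (fun x => x)).getD 0

-- ===== PORT B =====
-- the stack loop of _reduced_len; the Lean list head is the Python stack's top (stack[-1])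
def pvRedLoop (c cu : Char) : List Char → List Char → List Char
  | stack, [] => stack
  | stack, ch :: rest =>
    if ch == c || ch == cu then pvRedLoop c cu stack rest
    else
      match stack with
      | t :: ts =>
        if (t != ch) && (PySem.Chars.upperChar t == PySem.Chars.upperChar ch) then
          pvRedLoop c cu ts rest
        else
          pvRedLoop c cu (ch :: t :: ts) rest
      | [] => pvRedLoop c cu [ch] rest

def pvReducedLen (data : List Char) (c : Char) : Int :=
  ((pvRedLoop c (PySem.Chars.upperChar c) [] data).length : Int)

def rm_then_count_alt (data : String) : Int :=
  (PySem.List.min? (pvLetters.map (fun c => pvReducedLen data.toList c)) (fun x => x)).getD 0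

-- ===== PRECONDITION & SPEC =====
def Spec_rm_then_count (data : String) (out : Int) : Prop := out = rm_then_count_alt data
instance (data : String) (out : Int) : Decidable (Spec_rm_then_count data out) := by unfold Spec_rm_then_count; infer_instance

-- ===== CLAIM (what is proved, stated in full; the proofs are below) =====
def Claim_equal_rm_then_count : Prop := ∀ (data : String), Dom_rm_then_count data → Spec_rm_then_count data (rm_then_count data)

-- ===== LEMMAS AND PROOFS =====

-- the reaction test, as B writes it
lemma pvCheckEqual_eq (t ch : Char) :
    ((t != ch) && (PySem.Chars.upperChar t == PySem.Chars.upperChar ch)) = pvCheckEqual t ch := by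
  by_cases h1 : t = ch <;> by_cases h2 : PySem.Chars.upperChar t = PySem.Chars.upperChar ch <;>
    simp [pvCheckEqual, h1, h2, bne, Bool.and_comm]

-- proof-only abstraction: the plain stack reduction on an already-filtered string
def pvPlain : List Char → List Char → List Char
  | stack, [] => stack
  | stack, ch :: rest =>
    match stack with
    | t :: ts => if pvCheckEqual t ch then pvPlain ts rest else pvPlain (ch :: t :: ts) rest
    | [] => pvPlain [ch] rest

lemma pvRedLoop_eq_plain (c cu : Char) :
    ∀ (l stack : List Char),
      pvRedLoop c cu stack l = pvPlain stack (l.filter (fun ch => !(ch == c || ch == cu))) := by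
  intro l
  induction l with
  | nil => intro stack; rfl
  | cons ch rest ih =>
    intro stack
    by_cases hskip : (ch == c || ch == cu) = true
    · simp [pvRedLoop, hskip, List.filter, ih]
    · match stack with
      | [] => simp [pvRedLoop, pvPlain, hskip, List.filter, ih]
      | t :: ts =>
        rw [show pvRedLoop c cu (t :: ts) (ch :: rest) =
          (if (t != ch) && (PySem.Chars.upperChar t == PySem.Chars.upperChar ch) then
            pvRedLoop c cu ts rest else pvRedLoop c cu (ch :: t :: ts) rest) from by
            simp [pvRedLoop, hskip]]
        rw [pvCheckEqual_eq]
        have hf : (ch :: rest).filter (fun ch => !(ch == c || ch == cu)) =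
            ch :: rest.filter (fun ch => !(ch == c || ch == cu)) := by
          simp [List.filter, hskip]
        rw [hf]
        by_cases hr : pvCheckEqual t ch = true <;> simp [pvPlain, hr, ih]

lemma pvGo_single (c : Char) : ∀ (fuel : Nat) (l acc : List Char), l.length ≤ fuel →
    PySem.Chars.replace.go [c] [] fuel l acc = acc.reverse ++ l.filter (fun ch => ch != c) := by
  intro fuel
  induction fuel with
  | zero =>
    intro l acc h
    have : l = [] := List.eq_nil_of_length_eq_zero (Nat.le_zero.mp h)
    subst this
    simp [PySem.Chars.replace.go]
  | succ n ih =>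
    intro l acc h
    match l with
    | [] => simp [PySem.Chars.replace.go]
    | ch :: t =>
      rw [PySem.Chars.replace.go]
      by_cases hc : c = ch
      · subst hc
        have hp : [c].isPrefixOf (c :: t) = true := by simp [List.isPrefixOf]
        simp only [hp, if_true]
        rw [ih _ _ (by simpa using Nat.le_of_succ_le_succ h)]
        simp [List.filter, bne]
      · have hp : [c].isPrefixOf (ch :: t) = false := by simp [List.isPrefixOf, hc]
        simp only [hp]
        rw [if_neg (by simp), ih _ _ (by simpa using Nat.le_of_succ_le_succ h)]
        have hb : (ch == c) = false := beq_false_of_ne (Ne.symm hc)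
        simp [List.filter, bne, hb]

lemma pvReplace_single (c : Char) (l : List Char) :
    PySem.Chars.replace l [c] [] = l.filter (fun ch => ch != c) := by
  rw [PySem.Chars.replace]
  simp only [List.isEmpty_cons]
  rw [if_neg (by simp)]
  exact pvGo_single c l.length l [] (le_refl _)

-- A's splice-and-backtrack loop simulates the stack reduction: the reversed prefix before the
-- cursor is the stack, the suffix after it is the unread input.
lemma pvFcLoop_sim : ∀ (s : List Char) (i : Nat),
    pvFcLoop s i = (pvPlain ((s.take (i + 1)).reverse) (s.drop (i + 1))).length := by
  intro s i
  induction s, i using pvFcLoop.induct with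
  | case3 s i h =>
    rw [pvFcLoop, dif_neg h]
    rw [List.take_of_length_le (by omega), List.drop_of_length_le (by omega)]
    simp [pvPlain]
  | case1 s i h hr ih =>
    have hi : i < s.length := by omega
    rw [pvFcLoop, dif_pos h, if_pos hr, ih]
    have hdrop : s.drop (i + 1) = s[i + 1] :: s.drop (i + 2) := List.drop_eq_getElem_cons h
    have htake : (s.take (i + 1)).reverse = s[i] :: (s.take i).reverse := by
      rw [List.take_succ_eq_append_getElem hi]; simp
    rw [htake, hdrop]
    have hstep : pvPlain (s[i] :: (s.take i).reverse) (s[i + 1] :: s.drop (i + 2)) =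
        pvPlain ((s.take i).reverse) (s.drop (i + 2)) := by
      simp [pvPlain, hr]
    rw [hstep]
    cases i with
    | zero =>
      simp only [List.take_zero, List.reverse_nil, Nat.zero_sub, Nat.zero_add]
      match hd : s.drop 2 with
      | [] => simp [pvPlain]
      | d :: ds => simp [pvPlain, List.take, List.drop]
    | succ j =>
      have hlen : (s.take (j + 1)).length = j + 1 := by rw [List.length_take]; omega
      simp only [Nat.add_sub_cancel]
      rw [List.take_left' hlen, List.drop_left' hlen]
  | case2 s i h hr ih =>
    have hi : i < s.length := by omega
    rw [pvFcLoop, dif_pos h, if_neg hr, ih]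
    have hdrop : s.drop (i + 1) = s[i + 1] :: s.drop (i + 2) := List.drop_eq_getElem_cons h
    have htake : (s.take (i + 1)).reverse = s[i] :: (s.take i).reverse := by
      rw [List.take_succ_eq_append_getElem hi]; simp
    have htake2 : (s.take (i + 1 + 1)).reverse = s[i + 1] :: s[i] :: (s.take i).reverse := by
      rw [List.take_succ_eq_append_getElem h]; simp
    rw [htake2, htake, hdrop]
    simp [pvPlain, hr]

lemma pvFilterAndCount_eq (s : List Char) : pvFilterAndCount s = (pvPlain [] s).length := by
  unfold pvFilterAndCount
  rw [pvFcLoop_sim]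
  match s with
  | [] => rfl
  | c :: cs => simp [pvPlain, List.take, List.drop]

lemma pvPerLetter (data : List Char) (c : Char) :
    ((pvFilterAndCount (PySem.Chars.replace (PySem.Chars.replace data [c] [])
        [PySem.Chars.upperChar c] [])) : Int) = pvReducedLen data c := by
  unfold pvReducedLen
  rw [pvRedLoop_eq_plain, pvReplace_single, pvReplace_single, pvFilterAndCount_eq,
    List.filter_filter]
  have hpred : ∀ ch : Char, ((ch != PySem.Chars.upperChar c) && (ch != c)) =
      (!(ch == c || ch == PySem.Chars.upperChar c)) := by
    intro ch
    by_cases h1 : ch = c <;> by_cases h2 : ch = PySem.Chars.upperChar c <;> simp [h1, h2, bne, Bool.and_comm]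
  rw [List.filter_congr (fun ch _ => hpred ch)]

-- the 26 keys are distinct and fresh, so the dict's values are the per-letter results in order
lemma pvDict_values (data : String) :
    PySem.Dict.values (pvLetters.foldl (fun (d : PySem.Dict Char Int) ch =>
      d.insert ch ((pvFilterAndCount (PySem.Chars.replace (PySem.Chars.replace data.toList [ch] [])
        [PySem.Chars.upperChar ch] []) : Int))) PySem.Dict.empty) =
    pvLetters.map (fun ch => ((pvFilterAndCount (PySem.Chars.replace
      (PySem.Chars.replace data.toList [ch] []) [PySem.Chars.upperChar ch] []) : Int))) := by
  rw [PySem.Dict.values, PySem.Dict.items_foldl_insert_fresh pvLetters (fun a => a)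
    (fun ch => ((pvFilterAndCount (PySem.Chars.replace (PySem.Chars.replace data.toList [ch] [])
      [PySem.Chars.upperChar ch] []) : Int))) PySem.Dict.empty
    (fun a _ => PySem.Dict.contains_empty a) (by simp [pvLetters])]
  simp [PySem.Dict.empty, Function.comp]

-- ===== VERDICT (by name: the statement is the Claim_ definition above) =====
theorem rm_then_count_spec : Claim_equal_rm_then_count := by
  intro data _
  unfold Spec_rm_then_count rm_then_count rm_then_count_alt
  rw [pvDict_values]
  rw [List.map_congr_left (fun c _ => pvPerLetter data.toList c)]
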